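-- pv_equiv track=rewrite | github.com/ReciHub/FunnyAlgorithms | IslandIsolator/isolate_islands.py | isolate_islands
-- ===== SOURCE A (Python) =====
-- from typing import List, Tuple
--
-- World = List[List[int]]
--
-- Position = Tuple[int, int]
--
-- Neighbours = Tuple[Position]
--
-- def get_neighbours(pos: Tuple[int, int], limit: int) -> Neighbours:
--     """
--     Returns the neighbours of a position, in the order
--     [up, right, down, left]
--
--     :param limit: The limits of the positions
--     :param pos: The position whose neighbours are to
--     be found
--     """
--     neighbours: Neighbours = [
--         (pos[0] - 1, pos[1]),  # up
--         (pos[0], pos[1] + 1),  # right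
--         (pos[0] + 1, pos[1]),  # down
--         (pos[0], pos[1] - 1),  # left
--     ]
--     neighbours = [n for n in neighbours if n[0]
--                   in range(limit) and n[1] in range(limit)]
--     return neighbours
--
-- def get_continent_indices(world: World) -> List[Position]:
--     """
--     Returns the indices of the positions of all the
--     continents. Continent, here, is a 1 in the world
--     that is connected to the edges through other 1s
--
--     :param world: The world whose continent indices
--     are to be found
--     """
--     world_size = len(world)
--     continent_indices = set()
--
--     # Calculates the world's edges
--     edges = [(0, i) for i in range(world_size)]  # top edge
--     edges.extend([(i, world_size - 1)  # right edge
--                   for i in range(world_size)])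
--     edges.extend([(world_size - 1, i)  # bottom edge
--                  for i in range(world_size)])
--     edges.extend([(i, 0) for i in range(world_size)])  # left edge
--     edges = edges
--
--     def travel(pos: Position) -> None:
--         if world[pos[0]][pos[1]] == 1:
--             neighbours = get_neighbours(pos, limit=world_size)
--             for neighbour in neighbours:
--                 if world[neighbour[0]][neighbour[1]] == 1 and neighbour not in edges and neighbour not in continent_indices:
--                     continent_indices.add(neighbour)
--                     travel(neighbour)
--
--     for edge_pos in edges:
--         if world[edge_pos[0]][edge_pos[1]] == 1:
--             continent_indices.add(edge_pos)
--             travel(edge_pos)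
--
--     return list(continent_indices)
--
-- def isolate_islands(world: World) -> World:
--     """
--     Returns a new world with no islands. This is one of
--     the possible solutions to the problem discussed in
--     https://www.youtube.com/watch?v=4tYoVx0QoN0
--
--     :param world: The world to remove islands from
--     """
--     new_world = world
--     continent_indices = get_continent_indices(world)
--     for i, row in enumerate(world):
--         for j, col in enumerate(row):
--             if col == 1 and (i, j) not in continent_indices:
--                 new_world[i][j] = 0
--     return new_world
-- ===== SOURCE B (Python) =====
-- def isolate_islands(world):
--     """
--     Returns a new world with no islands (return-value equivalent to A;
--     A also mutates its argument in place, B does not).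
--     Iterative flood fill from the boundary with O(1) set membership.
--     """
--     n = len(world)
--     keep = set()
--     stack = []
--     for i in range(n):
--         for j in range(n):
--             if (i == 0 or i == n - 1 or j == 0 or j == n - 1) and world[i][j] == 1:
--                 if (i, j) not in keep:
--                     keep.add((i, j))
--                     stack.append((i, j))
--     while stack:
--         i, j = stack.pop()
--         for a, b in ((i - 1, j), (i, j + 1), (i + 1, j), (i, j - 1)):
--             if 0 <= a < n and 0 <= b < n and world[a][b] == 1 and (a, b) not in keep:
--                 keep.add((a, b))
--                 stack.append((a, b))
--     return [[0 if v == 1 and (i, j) not in keep else v for j, v in enumerate(row)]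
--             for i, row in enumerate(world)]
-- ===== Notes on version B (the rewrite author's own statement) =====
-- stated objective: alternative
-- what changed: A explores by recursive DFS over an explicit edges list (list membership inside the walk, and the final double loop rescans the continent list for every cell); B seeds an explicit stack with the boundary 1-cells in one pass and flood-fills iteratively with set membership and inline bounds checks (no edges list, no recursion), rebuilding the grid as a fresh nested comprehension; it trades A's in-place mutation for a rebuilt list and adds a seeding pass over the grid.
import Mathlib
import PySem

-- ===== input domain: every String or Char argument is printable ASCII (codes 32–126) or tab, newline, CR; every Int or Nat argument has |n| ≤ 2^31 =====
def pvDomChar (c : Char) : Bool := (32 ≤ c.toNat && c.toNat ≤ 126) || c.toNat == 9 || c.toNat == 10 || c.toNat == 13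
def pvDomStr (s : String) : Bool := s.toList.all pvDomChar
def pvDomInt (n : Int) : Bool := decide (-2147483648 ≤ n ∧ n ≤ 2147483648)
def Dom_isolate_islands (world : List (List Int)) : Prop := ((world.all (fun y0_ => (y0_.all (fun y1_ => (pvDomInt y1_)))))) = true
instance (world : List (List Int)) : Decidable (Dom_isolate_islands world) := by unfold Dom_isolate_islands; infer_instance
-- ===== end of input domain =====

-- B replaces A's recursive DFS over an edges list (list membership tests throughout) by an
-- iterative stack flood fill with set membership; return values agree on Pre_; note that A also
-- mutates its argument in place while B builds a new grid (the equivalence proved here is about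
-- the return value only).

-- ===== PORT A =====
-- world[i][j]; total stand-in: exact wherever Python does not raise (Pre_ excludes the raising inputs)
def cellA (world : List (List Int)) (p : Int × Int) : Int :=
  PySem.List.pyGetD (PySem.List.pyGetD world p.1 []) p.2 0

def get_neighbours (pos : Int × Int) (limit : Int) : List (Int × Int) :=
  ([(pos.1 - 1, pos.2), (pos.1, pos.2 + 1), (pos.1 + 1, pos.2), (pos.1, pos.2 - 1)]).filter
    (fun nb => decide (0 ≤ nb.1 ∧ nb.1 < limit ∧ 0 ≤ nb.2 ∧ nb.2 < limit))

-- the four edge comprehensions of get_continent_indices (duplicates kept, as in Python)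
def edgesA (n : Int) : List (Int × Int) :=
  (PySem.List.pyRange 0 n 1).map (fun i => ((0 : Int), i))
    ++ (PySem.List.pyRange 0 n 1).map (fun i => (i, n - 1))
    ++ (PySem.List.pyRange 0 n 1).map (fun i => (n - 1, i))
    ++ (PySem.List.pyRange 0 n 1).map (fun i => (i, (0 : Int)))

-- the recursive `travel`; the Nat argument is a fuel guard making the recursion total
-- (world.length * world.length + 1 is always enough: every nested call has first added a fresh in-grid cell)
def travelA (world : List (List Int)) (n : Int) : Nat → Int × Int → PySem.Set (Int × Int) → PySem.Set (Int × Int)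
  | 0, _, vis => vis
  | f + 1, pos, vis =>
    if cellA world pos = 1 then
      (get_neighbours pos n).foldl
        (fun vis nb =>
          if cellA world nb = 1 ∧ nb ∉ edgesA n ∧ PySem.Set.contains vis nb = false then
            travelA world n f nb (PySem.Set.add vis nb)
          else vis) vis
    else vis

-- get_continent_indices: loop over edges, seeding the set and travelling
def continentA (world : List (List Int)) : List (Int × Int) :=
  (edgesA (world.length : Int)).foldl
    (fun vis e =>
      if cellA world e = 1 then
        travelA world (world.length : Int) (world.length * world.length + 1) e (PySem.Set.add vis e)
      else vis)
    PySem.Set.empty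

def isolate_islands (world : List (List Int)) : List (List Int) :=
  let cont := continentA world
  (PySem.List.enumerate world 0).map fun ir =>
    (PySem.List.enumerate ir.2 0).map fun jc =>
      if jc.2 = 1 ∧ (ir.1, jc.1) ∉ cont then 0 else jc.2

-- ===== PORT B =====
def cellB (world : List (List Int)) (i j : Int) : Int :=
  PySem.List.pyGetD (PySem.List.pyGetD world i []) j 0

-- the boundary double loop seeding keep and stack
def seedB (world : List (List Int)) (n : Int) : PySem.Set (Int × Int) × List (Int × Int) :=
  (PySem.List.pyRange 0 n 1).foldl
    (fun st i =>
      (PySem.List.pyRange 0 n 1).foldl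
        (fun st j =>
          if (i = 0 ∨ i = n - 1 ∨ j = 0 ∨ j = n - 1) ∧ cellB world i j = 1 then
            if PySem.Set.contains st.1 (i, j) = false then
              (PySem.Set.add st.1 (i, j), st.2 ++ [(i, j)])
            else st
          else st)
        st)
    (PySem.Set.empty, [])

-- the while loop; the Nat argument is a fuel guard making the loop total
-- (6 * len(world)^2 + 1 is always enough: each iteration pops once and every push marks a fresh in-grid cell)
def loopB (world : List (List Int)) (n : Int) :
    Nat → List (Int × Int) → PySem.Set (Int × Int) → PySem.Set (Int × Int)
  | 0, _, keep => keep
  | f + 1, stack, keep =>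
    match stack.getLast? with
    | none => keep
    | some p =>
      let st :=
        [(p.1 - 1, p.2), (p.1, p.2 + 1), (p.1 + 1, p.2), (p.1, p.2 - 1)].foldl
          (fun st nb =>
            if (0 ≤ nb.1 ∧ nb.1 < n ∧ 0 ≤ nb.2 ∧ nb.2 < n) ∧ cellB world nb.1 nb.2 = 1 ∧
                PySem.Set.contains st.1 nb = false then
              (PySem.Set.add st.1 nb, st.2 ++ [nb])
            else st)
          (keep, stack.dropLast)
      loopB world n f st.2 st.1

def isolate_islands_alt (world : List (List Int)) : List (List Int) :=
  let seed := seedB world (world.length : Int)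
  let keep := loopB world (world.length : Int) (6 * (world.length * world.length) + 1) seed.2 seed.1
  (PySem.List.enumerate world 0).map fun ir =>
    (PySem.List.enumerate ir.2 0).map fun jc =>
      if jc.2 = 1 ∧ PySem.Set.contains keep (ir.1, jc.1) = false then 0 else jc.2

-- ===== PRECONDITION & SPEC =====
-- A reads columns 0 and len(world)-1 of every row (and all of rows 0 and len(world)-1)
-- unconditionally, so it raises IndexError exactly when some row is shorter than len(world);
-- Pre_ excludes exactly those inputs (it is exactly A's return domain).
def Pre_isolate_islands (world : List (List Int)) : Prop :=
  ∀ row ∈ world, world.length ≤ row.length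
instance (world : List (List Int)) : Decidable (Pre_isolate_islands world) := by
  unfold Pre_isolate_islands; infer_instance

def pvWitness_isolate_islands : List (List Int) := [[1, 0], [0, 1]]

def Spec_isolate_islands (world : List (List Int)) (out : List (List Int)) : Prop :=
  out = isolate_islands_alt world
instance (world : List (List Int)) (out : List (List Int)) : Decidable (Spec_isolate_islands world out) := by
  unfold Spec_isolate_islands; infer_instance

-- ===== CLAIM (what is proved, stated in full; the proofs are below) =====
def Claim_equal_isolate_islands : Prop :=
  ∀ (world : List (List Int)), Dom_isolate_islands world → Pre_isolate_islands world →
    Spec_isolate_islands world (isolate_islands world)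

-- ===== LEMMAS AND PROOFS =====

theorem cellBA (world : List (List Int)) (i j : Int) : cellB world i j = cellA world (i, j) := rfl

theorem mem_get_neighbours {q p : Int × Int} {n : Int} :
    q ∈ get_neighbours p n ↔
      (q = (p.1 - 1, p.2) ∨ q = (p.1, p.2 + 1) ∨ q = (p.1 + 1, p.2) ∨ q = (p.1, p.2 - 1)) ∧
        (0 ≤ q.1 ∧ q.1 < n ∧ 0 ≤ q.2 ∧ q.2 < n) := by
  simp [get_neighbours, List.mem_filter]

theorem mem_edgesA {p : Int × Int} {n : Int} :
    p ∈ edgesA n ↔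
      ((0 ≤ p.1 ∧ p.1 < n ∧ 0 ≤ p.2 ∧ p.2 < n) ∧
        (p.1 = 0 ∨ p.1 = n - 1 ∨ p.2 = 0 ∨ p.2 = n - 1)) := by
  obtain ⟨a, b⟩ := p
  simp only [edgesA, List.mem_append, List.mem_map, PySem.List.mem_pyRange_one, Prod.mk.injEq]
  constructor
  · rintro (⟨i, hi, rfl, rfl⟩ | ⟨i, hi, rfl, rfl⟩ | ⟨i, hi, rfl, rfl⟩ | ⟨i, hi, rfl, rfl⟩) <;>
      exact ⟨⟨by omega, by omega, by omega, by omega⟩, by omega⟩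
  · rintro ⟨⟨h0, h1, h2, h3⟩, h | h | h | h⟩
    · exact Or.inl (Or.inl (Or.inl ⟨b, ⟨h2, h3⟩, by omega, by omega⟩))
    · exact Or.inl (Or.inr ⟨b, ⟨h2, h3⟩, by omega, by omega⟩)
    · exact Or.inr ⟨a, ⟨h0, h1⟩, by omega, by omega⟩
    · exact Or.inl (Or.inl (Or.inr ⟨a, ⟨h0, h1⟩, by omega, by omega⟩))

-- grid of all in-range cells, and the count of cells not yet visited (the termination measure)
noncomputable def gridF (n : Int) : Finset (Int × Int) := Finset.Icc 0 (n - 1) ×ˢ Finset.Icc 0 (n - 1)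

noncomputable def freeS (n : Int) (s : PySem.Set (Int × Int)) : Nat :=
  ((gridF n).filter (fun c => c ∉ s)).card

theorem mem_gridF {n : Int} {p : Int × Int} :
    p ∈ gridF n ↔ (0 ≤ p.1 ∧ p.1 < n ∧ 0 ≤ p.2 ∧ p.2 < n) := by
  obtain ⟨a, b⟩ := p
  simp only [gridF, Finset.mem_product, Finset.mem_Icc]
  omega

theorem card_gridF (n : Int) : (gridF n).card = n.toNat * n.toNat := by
  simp [gridF, Int.card_Icc]

theorem freeS_le (n : Int) (s : PySem.Set (Int × Int)) : freeS n s ≤ n.toNat * n.toNat :=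
  le_trans (Finset.card_filter_le _ _) (le_of_eq (card_gridF n))

theorem freeS_mono {n : Int} {s t : PySem.Set (Int × Int)} (h : ∀ x ∈ s, x ∈ t) :
    freeS n t ≤ freeS n s := by
  apply Finset.card_le_card
  intro c hc
  rw [Finset.mem_filter] at hc ⊢
  exact ⟨hc.1, fun hcs => hc.2 (h c hcs)⟩

theorem freeS_add_lt {n : Int} {s : PySem.Set (Int × Int)} {p : Int × Int}
    (hg : 0 ≤ p.1 ∧ p.1 < n ∧ 0 ≤ p.2 ∧ p.2 < n) (hp : p ∉ s) :
    freeS n (PySem.Set.add s p) < freeS n s := by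
  apply Finset.card_lt_card
  constructor
  · intro c hc
    rw [Finset.mem_filter] at hc ⊢
    exact ⟨hc.1, fun hcs => hc.2 ((PySem.Set.mem_add s p c).mpr (Or.inl hcs))⟩
  · intro hsub
    have hpmem : p ∈ (gridF n).filter (fun c => c ∉ s) :=
      Finset.mem_filter.mpr ⟨mem_gridF.mpr hg, hp⟩
    have := hsub hpmem
    rw [Finset.mem_filter] at this
    exact this.2 ((PySem.Set.mem_add s p p).mpr (Or.inr rfl))

-- reachability from the edges through 1-cells: the semantics both programs compute
inductive ReachA (world : List (List Int)) : Int × Int → Prop where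
  | base : ∀ p, p ∈ edgesA (world.length : Int) → cellA world p = 1 → ReachA world p
  | step : ∀ p q, ReachA world p → q ∈ get_neighbours p (world.length : Int) →
      cellA world q = 1 → ReachA world q

-- "q is saturated in S, up to edge cells"
def SatE (world : List (List Int)) (n : Int) (S : List (Int × Int)) (q : Int × Int) : Prop :=
  ∀ nb ∈ get_neighbours q n, cellA world nb = 1 → nb ∈ edgesA n ∨ nb ∈ S

theorem SatE_mono {world n S T q} (h : ∀ x ∈ S, x ∈ T) (hs : SatE world n S q) :
    SatE world n T q := fun nb hnb hc => (hs nb hnb hc).imp id (h nb)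

-- the body of travel's for-loop, named for the proofs
def stepA (world : List (List Int)) (n : Int) (f : Nat) :
    PySem.Set (Int × Int) → Int × Int → PySem.Set (Int × Int) :=
  fun vis nb =>
    if cellA world nb = 1 ∧ nb ∉ edgesA n ∧ PySem.Set.contains vis nb = false then
      travelA world n f nb (PySem.Set.add vis nb)
    else vis

theorem travelA_succ (world : List (List Int)) (n : Int) (f : Nat) (pos : Int × Int)
    (vis : PySem.Set (Int × Int)) :
    travelA world n (f + 1) pos vis =
      if cellA world pos = 1 then (get_neighbours pos n).foldl (stepA world n f) vis else vis := rfl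

theorem travelA_mono (world : List (List Int)) (n : Int) :
    ∀ (f : Nat) (p : Int × Int) (vis : PySem.Set (Int × Int)) (x : Int × Int),
      x ∈ vis → x ∈ travelA world n f p vis := by
  intro f
  induction f with
  | zero => intro p vis x hx; exact hx
  | succ f ih =>
    intro p vis x hx
    rw [travelA_succ]
    split
    · refine List.foldlRecOn _ _ hx (fun b hb a _ => ?_)
      unfold stepA
      split
      · exact ih _ _ _ ((PySem.Set.mem_add b a x).mpr (Or.inl hb))
      · exact hb
    · exact hx

theorem foldA_spec (world : List (List Int)) (n : Int) (f : Nat)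
    (IH : ∀ p vis, freeS n vis < f →
      (∀ q ∈ travelA world n f p vis, q ∉ vis →
        cellA world q = 1 ∧ SatE world n (travelA world n f p vis) q) ∧
      (cellA world p = 1 → SatE world n (travelA world n f p vis) p)) :
    ∀ (l : List (Int × Int)) (vis : PySem.Set (Int × Int)),
      (∀ nb ∈ l, 0 ≤ nb.1 ∧ nb.1 < n ∧ 0 ≤ nb.2 ∧ nb.2 < n) →
      freeS n vis ≤ f →
      (∀ x ∈ vis, x ∈ l.foldl (stepA world n f) vis) ∧
      (∀ q ∈ l.foldl (stepA world n f) vis, q ∉ vis →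
        cellA world q = 1 ∧ SatE world n (l.foldl (stepA world n f) vis) q) ∧
      (∀ nb ∈ l, cellA world nb = 1 → nb ∈ edgesA n ∨ nb ∈ l.foldl (stepA world n f) vis) := by
  intro l
  induction l with
  | nil =>
    intro vis _ _
    exact ⟨fun x hx => hx, fun q hq hq' => absurd hq hq', by simp⟩
  | cons nb l ih =>
    intro vis hl hfree
    have hnb := hl nb (List.mem_cons_self)
    simp only [List.foldl_cons]
    by_cases hc : cellA world nb = 1 ∧ nb ∉ edgesA n ∧ PySem.Set.contains vis nb = false
    · have hnbvis : nb ∉ vis := by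
        intro h
        have := (PySem.Set.contains_iff vis nb).mpr h
        rw [hc.2.2] at this
        exact Bool.false_ne_true this
      have hstep : stepA world n f vis nb = travelA world n f nb (PySem.Set.add vis nb) := by
        unfold stepA; rw [if_pos hc]
      have hfree1 : freeS n (PySem.Set.add vis nb) < f :=
        lt_of_lt_of_le (freeS_add_lt hnb hnbvis) hfree
      have hIH := IH nb (PySem.Set.add vis nb) hfree1
      have hsub1 : ∀ x ∈ vis, x ∈ travelA world n f nb (PySem.Set.add vis nb) :=
        fun x hx => travelA_mono world n f nb _ x ((PySem.Set.mem_add vis nb x).mpr (Or.inl hx))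
      have hnbmem : nb ∈ travelA world n f nb (PySem.Set.add vis nb) :=
        travelA_mono world n f nb _ nb ((PySem.Set.mem_add vis nb nb).mpr (Or.inr rfl))
      have hfree2 : freeS n (travelA world n f nb (PySem.Set.add vis nb)) ≤ f :=
        le_of_lt (lt_of_le_of_lt
          (freeS_mono (fun x hx => travelA_mono world n f nb _ x hx)) hfree1)
      obtain ⟨sub2, new2, cov2⟩ :=
        ih (travelA world n f nb (PySem.Set.add vis nb))
          (fun m hm => hl m (List.mem_cons_of_mem _ hm)) hfree2
      rw [hstep]
      refine ⟨fun x hx => sub2 _ (hsub1 x hx), ?_, ?_⟩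
      · intro q hq hqvis
        by_cases hq1 : q ∈ travelA world n f nb (PySem.Set.add vis nb)
        · by_cases hq2 : q ∈ PySem.Set.add vis nb
          · have hqe : q = nb := by
              rcases (PySem.Set.mem_add vis nb q).mp hq2 with h | h
              · exact absurd h hqvis
              · exact h
            subst hqe
            exact ⟨hc.1, SatE_mono sub2 (hIH.2 hc.1)⟩
          · obtain ⟨hcell, hsat⟩ := hIH.1 q hq1 hq2
            exact ⟨hcell, SatE_mono sub2 hsat⟩
        · exact new2 q hq hq1
      · intro m hm hcm
        rcases List.mem_cons.mp hm with rfl | hm'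
        · exact Or.inr (sub2 _ hnbmem)
        · exact cov2 m hm' hcm
    · have hstep : stepA world n f vis nb = vis := by unfold stepA; rw [if_neg hc]
      rw [hstep]
      obtain ⟨sub2, new2, cov2⟩ := ih vis (fun m hm => hl m (List.mem_cons_of_mem _ hm)) hfree
      refine ⟨sub2, new2, ?_⟩
      intro m hm hcm
      rcases List.mem_cons.mp hm with rfl | hm'
      · by_cases hB : m ∈ edgesA n
        · exact Or.inl hB
        · have hC : PySem.Set.contains vis m = true := by
            cases h : PySem.Set.contains vis m
            · exact absurd ⟨hcm, hB, h⟩ hc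
            · rfl
          exact Or.inr (sub2 _ ((PySem.Set.contains_iff vis m).mp hC))
      · exact cov2 m hm' hcm

theorem travelA_spec (world : List (List Int)) (n : Int) :
    ∀ (f : Nat) (p : Int × Int) (vis : PySem.Set (Int × Int)), freeS n vis < f →
      (∀ q ∈ travelA world n f p vis, q ∉ vis →
        cellA world q = 1 ∧ SatE world n (travelA world n f p vis) q) ∧
      (cellA world p = 1 → SatE world n (travelA world n f p vis) p) := by
  intro f
  induction f with
  | zero => intro p vis h; exact absurd h (Nat.not_lt_zero _)
  | succ f ih =>
    intro p vis h
    by_cases hc : cellA world p = 1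
    · rw [travelA_succ, if_pos hc]
      obtain ⟨sub, new, cov⟩ :=
        foldA_spec world n f ih (get_neighbours p n) vis
          (fun nb hnb => (mem_get_neighbours.mp hnb).2) (Nat.lt_succ_iff.mp h)
      exact ⟨new, fun _ => cov⟩
    · rw [travelA_succ, if_neg hc]
      exact ⟨fun q hq hq' => absurd hq hq', fun h' => absurd h' hc⟩

theorem travelA_reach (world : List (List Int)) :
    ∀ (f : Nat) (p : Int × Int) (vis : PySem.Set (Int × Int)),
      ReachA world p → (∀ x ∈ vis, ReachA world x) →
      ∀ x ∈ travelA world (world.length : Int) f p vis, ReachA world x := by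
  intro f
  induction f with
  | zero => intro p vis _ hv x hx; exact hv x hx
  | succ f ih =>
    intro p vis hp hv x hx
    rw [travelA_succ] at hx
    by_cases hc : cellA world p = 1
    · rw [if_pos hc] at hx
      refine List.foldlRecOn (motive := fun s => ∀ x ∈ s, ReachA world x) _ _ hv (fun b hb a ha => ?_) x hx
      unfold stepA
      split
      · rename_i hcond
        intro y hy
        have hra : ReachA world a := ReachA.step p a hp ha hcond.1
        exact ih a _ hra
          (fun z hz => ((PySem.Set.mem_add b a z).mp hz).elim (hb z) (fun e => e ▸ hra)) y hy
      · exact hb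
    · rw [if_neg hc] at hx
      exact hv x hx

-- the body of get_continent_indices' outer loop
def stepOuter (world : List (List Int)) :
    PySem.Set (Int × Int) → Int × Int → PySem.Set (Int × Int) :=
  fun vis e =>
    if cellA world e = 1 then
      travelA world (world.length : Int) (world.length * world.length + 1) e (PySem.Set.add vis e)
    else vis

theorem continentA_eq (world : List (List Int)) :
    continentA world = (edgesA (world.length : Int)).foldl (stepOuter world) PySem.Set.empty := rfl

theorem edges_fold_mem (world : List (List Int)) :
    ∀ (l : List (Int × Int)) (vis : PySem.Set (Int × Int)),
      (∀ x ∈ vis, x ∈ l.foldl (stepOuter world) vis) ∧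
      (∀ e ∈ l, cellA world e = 1 → e ∈ l.foldl (stepOuter world) vis) := by
  intro l
  induction l with
  | nil => intro vis; exact ⟨fun x hx => hx, by simp⟩
  | cons e l ih =>
    intro vis
    simp only [List.foldl_cons]
    by_cases hc : cellA world e = 1
    · have hstep : stepOuter world vis e =
          travelA world (world.length : Int) (world.length * world.length + 1) e
            (PySem.Set.add vis e) := by
        unfold stepOuter; rw [if_pos hc]
      rw [hstep]
      obtain ⟨mono, cov⟩ := ih (travelA world (world.length : Int)
        (world.length * world.length + 1) e (PySem.Set.add vis e))
      refine ⟨fun x hx => mono x (travelA_mono _ _ _ _ _ x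
        ((PySem.Set.mem_add vis e x).mpr (Or.inl hx))), ?_⟩
      intro e' he' hce'
      rcases List.mem_cons.mp he' with rfl | h
      · exact mono _ (travelA_mono _ _ _ _ _ e' ((PySem.Set.mem_add vis e' e').mpr (Or.inr rfl)))
      · exact cov e' h hce'
    · have hstep : stepOuter world vis e = vis := by unfold stepOuter; rw [if_neg hc]
      rw [hstep]
      obtain ⟨mono, cov⟩ := ih vis
      refine ⟨mono, ?_⟩
      intro e' he' hce'
      rcases List.mem_cons.mp he' with rfl | h
      · exact absurd hce' hc
      · exact cov e' h hce'

theorem SA_edges (world : List (List Int)) :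
    ∀ e ∈ edgesA (world.length : Int), cellA world e = 1 → e ∈ continentA world := by
  rw [continentA_eq]
  exact (edges_fold_mem world _ PySem.Set.empty).2

theorem SA_sound (world : List (List Int)) : ∀ x ∈ continentA world, ReachA world x := by
  rw [continentA_eq]
  refine List.foldlRecOn (motive := fun s => ∀ x ∈ s, ReachA world x) _ _
    (fun x hx => absurd hx (List.not_mem_nil)) (fun b hb e he => ?_)
  unfold stepOuter
  split
  · rename_i hc
    have hre : ReachA world e := ReachA.base e he hc
    exact travelA_reach world _ e _ hre
      (fun z hz => ((PySem.Set.mem_add b e z).mp hz).elim (hb z) (fun h => h ▸ hre))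
  · exact hb

theorem SA_sat (world : List (List Int)) :
    ∀ q ∈ continentA world,
      cellA world q = 1 ∧ SatE world (world.length : Int) (continentA world) q := by
  rw [continentA_eq]
  refine List.foldlRecOn
    (motive := fun s => ∀ q ∈ s, cellA world q = 1 ∧ SatE world (world.length : Int) s q) _ _
    (fun x hx => absurd hx (List.not_mem_nil)) (fun b hb e _ => ?_)
  by_cases hc : cellA world e = 1
  · have hstep : stepOuter world b e =
        travelA world (world.length : Int) (world.length * world.length + 1) e
          (PySem.Set.add b e) := by
      unfold stepOuter; rw [if_pos hc]
    rw [hstep]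
    have hfree : freeS (world.length : Int) (PySem.Set.add b e) <
        world.length * world.length + 1 := by
      have := freeS_le (world.length : Int) (PySem.Set.add b e)
      simp only [Int.toNat_natCast] at this
      omega
    have hspec := travelA_spec world (world.length : Int)
      (world.length * world.length + 1) e (PySem.Set.add b e) hfree
    have hsub : ∀ x ∈ PySem.Set.add b e,
        x ∈ travelA world (world.length : Int) (world.length * world.length + 1) e
          (PySem.Set.add b e) := fun x hx => travelA_mono _ _ _ _ _ x hx
    intro q hq
    by_cases h1 : q ∈ PySem.Set.add b e
    · rcases (PySem.Set.mem_add b e q).mp h1 with h2 | h2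
      · obtain ⟨hc', hsat⟩ := hb q h2
        exact ⟨hc', SatE_mono (fun x hx => hsub x ((PySem.Set.mem_add b e x).mpr (Or.inl hx))) hsat⟩
      · subst h2
        exact ⟨hc, hspec.2 hc⟩
    · exact hspec.1 q hq h1
  · have hstep : stepOuter world b e = b := by unfold stepOuter; rw [if_neg hc]
    rw [hstep]
    exact hb

theorem SA_complete (world : List (List Int)) :
    ∀ p, ReachA world p → p ∈ continentA world := by
  intro p hp
  induction hp with
  | base p hpe hpc => exact SA_edges world p hpe hpc
  | step p q _ hq hc ih =>
    rcases (SA_sat world p ih).2 q hq hc with h | h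
    · exact SA_edges world q h hc
    · exact h

-- ========== B side ==========

-- the body of the while loop's neighbour scan, named for the proofs
def stepB (world : List (List Int)) (n : Int) :
    PySem.Set (Int × Int) × List (Int × Int) → Int × Int →
      PySem.Set (Int × Int) × List (Int × Int) :=
  fun st nb =>
    if (0 ≤ nb.1 ∧ nb.1 < n ∧ 0 ≤ nb.2 ∧ nb.2 < n) ∧ cellB world nb.1 nb.2 = 1 ∧
        PySem.Set.contains st.1 nb = false then
      (PySem.Set.add st.1 nb, st.2 ++ [nb])
    else st

theorem loopB_succ (world : List (List Int)) (n : Int) (f : Nat)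
    (stack : List (Int × Int)) (keep : PySem.Set (Int × Int)) :
    loopB world n (f + 1) stack keep =
      match stack.getLast? with
      | none => keep
      | some p =>
        loopB world n f
          (([(p.1 - 1, p.2), (p.1, p.2 + 1), (p.1 + 1, p.2), (p.1, p.2 - 1)].foldl
            (stepB world n) (keep, stack.dropLast)).2)
          (([(p.1 - 1, p.2), (p.1, p.2 + 1), (p.1 + 1, p.2), (p.1, p.2 - 1)].foldl
            (stepB world n) (keep, stack.dropLast)).1) := rfl

theorem foldB_keep_mono (world : List (List Int)) (n : Int) (l : List (Int × Int))
    (st : PySem.Set (Int × Int) × List (Int × Int)) :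
    ∀ x ∈ st.1, x ∈ (l.foldl (stepB world n) st).1 := by
  intro x hx
  refine List.foldlRecOn (motive := fun (s : PySem.Set (Int × Int) × List (Int × Int)) => x ∈ s.1) l _ hx (fun b hb a _ => ?_)
  unfold stepB
  split
  · exact (PySem.Set.mem_add b.1 a x).mpr (Or.inl hb)
  · exact hb

theorem foldB_stack_mono (world : List (List Int)) (n : Int) (l : List (Int × Int))
    (st : PySem.Set (Int × Int) × List (Int × Int)) :
    ∀ x ∈ st.2, x ∈ (l.foldl (stepB world n) st).2 := by
  intro x hx
  refine List.foldlRecOn (motive := fun (s : PySem.Set (Int × Int) × List (Int × Int)) => x ∈ s.2) l _ hx (fun b hb a _ => ?_)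
  unfold stepB
  split
  · exact List.mem_append_left _ hb
  · exact hb

theorem foldB_stack_sub (world : List (List Int)) (n : Int) (l : List (Int × Int))
    (st : PySem.Set (Int × Int) × List (Int × Int)) (h : ∀ x ∈ st.2, x ∈ st.1) :
    ∀ x ∈ (l.foldl (stepB world n) st).2, x ∈ (l.foldl (stepB world n) st).1 := by
  refine List.foldlRecOn (motive := fun (s : PySem.Set (Int × Int) × List (Int × Int)) => ∀ x ∈ s.2, x ∈ s.1) l _ h (fun b hb a _ => ?_)
  unfold stepB
  split
  · intro x hx
    rcases List.mem_append.mp hx with h' | h'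
    · exact (PySem.Set.mem_add b.1 a x).mpr (Or.inl (hb x h'))
    · exact (PySem.Set.mem_add b.1 a x).mpr (Or.inr (List.mem_singleton.mp h'))
  · exact hb

theorem foldB_new_mem_stack (world : List (List Int)) (n : Int) (l : List (Int × Int))
    (st : PySem.Set (Int × Int) × List (Int × Int)) :
    ∀ x ∈ (l.foldl (stepB world n) st).1, x ∈ st.1 ∨ x ∈ (l.foldl (stepB world n) st).2 := by
  induction l generalizing st with
  | nil => exact fun x hx => Or.inl hx
  | cons a l ih =>
    intro x hx
    simp only [List.foldl_cons] at hx ⊢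
    by_cases hcond : (0 ≤ a.1 ∧ a.1 < n ∧ 0 ≤ a.2 ∧ a.2 < n) ∧ cellB world a.1 a.2 = 1 ∧
        PySem.Set.contains st.1 a = false
    · have hstep : stepB world n st a = (PySem.Set.add st.1 a, st.2 ++ [a]) := by
        unfold stepB; rw [if_pos hcond]
      rw [hstep] at hx ⊢
      rcases ih _ x hx with h1 | h2
      · rcases (PySem.Set.mem_add st.1 a x).mp h1 with h' | h'
        · exact Or.inl h'
        · subst h'
          exact Or.inr (foldB_stack_mono world n l _ x
            (List.mem_append_right _ (List.mem_singleton.mpr rfl)))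
      · exact Or.inr h2
    · have hstep : stepB world n st a = st := by unfold stepB; rw [if_neg hcond]
      rw [hstep] at hx ⊢
      exact ih st x hx

theorem foldB_cover (world : List (List Int)) (n : Int) :
    ∀ (l : List (Int × Int)) (st : PySem.Set (Int × Int) × List (Int × Int)),
      ∀ nb ∈ l, (0 ≤ nb.1 ∧ nb.1 < n ∧ 0 ≤ nb.2 ∧ nb.2 < n) → cellA world nb = 1 →
        nb ∈ (l.foldl (stepB world n) st).1 := by
  intro l
  induction l with
  | nil => intro st nb h; exact absurd h (List.not_mem_nil)
  | cons a l ih =>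
    intro st nb hm hg hc
    simp only [List.foldl_cons]
    rcases List.mem_cons.mp hm with rfl | hm'
    · by_cases hf : PySem.Set.contains st.1 nb = false
      · have hstep : stepB world n st nb = (PySem.Set.add st.1 nb, st.2 ++ [nb]) := by
          unfold stepB
          rw [if_pos ⟨hg, by rw [cellBA]; exact hc, hf⟩]
        rw [hstep]
        exact foldB_keep_mono world n l _ nb ((PySem.Set.mem_add st.1 nb nb).mpr (Or.inr rfl))
      · have hmem : nb ∈ st.1 := by
          rcases h : PySem.Set.contains st.1 nb with _ | _
          · exact absurd h hf
          · exact (PySem.Set.contains_iff st.1 nb).mp h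
        have : nb ∈ (stepB world n st nb).1 := by
          unfold stepB
          split
          · exact (PySem.Set.mem_add st.1 nb nb).mpr (Or.inl hmem)
          · exact hmem
        exact foldB_keep_mono world n l _ nb this
    · exact ih _ nb hm' hg hc

theorem foldB_measure (world : List (List Int)) (n : Int) :
    ∀ (l : List (Int × Int)) (st : PySem.Set (Int × Int) × List (Int × Int)),
      5 * freeS n (l.foldl (stepB world n) st).1 + (l.foldl (stepB world n) st).2.length ≤
        5 * freeS n st.1 + st.2.length := by
  intro l
  induction l with
  | nil => intro st; exact le_refl _
  | cons a l ih =>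
    intro st
    simp only [List.foldl_cons]
    refine le_trans (ih (stepB world n st a)) ?_
    unfold stepB
    split
    · rename_i hcond
      have hnotmem : a ∉ st.1 := by
        intro h
        have := (PySem.Set.contains_iff st.1 a).mpr h
        rw [hcond.2.2] at this
        exact Bool.false_ne_true this
      have := freeS_add_lt (n := n) hcond.1 hnotmem
      simp only [List.length_append, List.length_singleton]
      omega
    · exact le_refl _

theorem foldB_reach (world : List (List Int)) (p : Int × Int) (hp : ReachA world p) :
    ∀ (l : List (Int × Int)),
      (∀ nb ∈ l, (0 ≤ nb.1 ∧ nb.1 < (world.length : Int) ∧ 0 ≤ nb.2 ∧ nb.2 < (world.length : Int)) →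
        nb ∈ get_neighbours p (world.length : Int)) →
      ∀ (st : PySem.Set (Int × Int) × List (Int × Int)),
        (∀ x ∈ st.1, ReachA world x) →
        ∀ x ∈ (l.foldl (stepB world (world.length : Int)) st).1, ReachA world x := by
  intro l hl
  induction l with
  | nil => intro st h x hx; exact h x hx
  | cons a l ih =>
    intro st h x hx
    simp only [List.foldl_cons] at hx
    refine ih (fun nb hnb => hl nb (List.mem_cons_of_mem _ hnb)) _ ?_ x hx
    intro y hy
    unfold stepB at hy
    split at hy
    · rename_i hcond
      rcases (PySem.Set.mem_add st.1 a y).mp hy with h' | h'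
      · exact h y h'
      · subst h'
        exact ReachA.step p y hp (hl y (List.mem_cons_self) hcond.1)
          (by rw [← cellBA]; exact hcond.2.1)
    · exact h y hy

theorem loopB_mono (world : List (List Int)) (n : Int) :
    ∀ (f : Nat) (stack : List (Int × Int)) (keep : PySem.Set (Int × Int)) (x : Int × Int),
      x ∈ keep → x ∈ loopB world n f stack keep := by
  intro f
  induction f with
  | zero => intro stack keep x hx; exact hx
  | succ f ih =>
    intro stack keep x hx
    rw [loopB_succ]
    cases hg : stack.getLast? with
    | none => exact hx
    | some p => exact ih _ _ x (foldB_keep_mono world n _ _ x hx)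

theorem loopB_sound (world : List (List Int)) :
    ∀ (f : Nat) (stack : List (Int × Int)) (keep : PySem.Set (Int × Int)),
      (∀ x ∈ stack, x ∈ keep) → (∀ x ∈ keep, ReachA world x) →
      ∀ x ∈ loopB world (world.length : Int) f stack keep, ReachA world x := by
  intro f
  induction f with
  | zero => intro stack keep _ hk x hx; exact hk x hx
  | succ f ih =>
    intro stack keep hsk hk x hx
    rw [loopB_succ] at hx
    cases hg : stack.getLast? with
    | none => rw [hg] at hx; exact hk x hx
    | some p =>
      rw [hg] at hx
      obtain ⟨st', rfl⟩ := List.getLast?_eq_some_iff.mp hg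
      have hp : ReachA world p := hk p (hsk p (by simp))
      have hdl : (st' ++ [p]).dropLast = st' := by simp
      refine ih _ _ ?_ ?_ x hx
      · rw [hdl]
        exact foldB_stack_sub world _ _ _
          (fun y hy => hsk y (List.mem_append_left _ hy))
      · rw [hdl]
        refine foldB_reach world p hp _ ?_ _ hk
        intro nb hnb hgnb
        refine mem_get_neighbours.mpr ⟨?_, hgnb⟩
        simpa using hnb

theorem loopB_sat (world : List (List Int)) (n : Int) :
    ∀ (f : Nat) (stack : List (Int × Int)) (keep : PySem.Set (Int × Int)),
      5 * freeS n keep + stack.length < f →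
      (∀ x ∈ stack, x ∈ keep) →
      (∀ q ∈ keep, q ∈ stack ∨
        (∀ nb ∈ get_neighbours q n, cellA world nb = 1 → nb ∈ keep)) →
      ∀ q ∈ loopB world n f stack keep, ∀ nb ∈ get_neighbours q n,
        cellA world nb = 1 → nb ∈ loopB world n f stack keep := by
  intro f
  induction f with
  | zero => intro stack keep h; exact absurd h (Nat.not_lt_zero _)
  | succ f ih =>
    intro stack keep hm hsk hinv
    cases hg : stack.getLast? with
    | none =>
      have hnil : stack = [] := List.getLast?_eq_none_iff.mp hg
      subst hnil
      rw [loopB_succ]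
      intro q hq nb hnb hc
      rcases hinv q hq with h | h
      · exact absurd h (List.not_mem_nil)
      · exact h nb hnb hc
    | some p =>
      obtain ⟨st', rfl⟩ := List.getLast?_eq_some_iff.mp hg
      rw [loopB_succ, hg]
      have hdl : (st' ++ [p]).dropLast = st' := by simp
      rw [hdl]
      set r := [(p.1 - 1, p.2), (p.1, p.2 + 1), (p.1 + 1, p.2), (p.1, p.2 - 1)].foldl
        (stepB world n) (keep, st') with hr
      have hmea : 5 * freeS n r.1 + r.2.length ≤ 5 * freeS n keep + st'.length :=
        foldB_measure world n _ _
      have hlen : (st' ++ [p]).length = st'.length + 1 := by simp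
      refine ih r.2 r.1 ?_ ?_ ?_
      · rw [hlen] at hm; omega
      · exact foldB_stack_sub world n _ _ (fun y hy => hsk y (List.mem_append_left _ hy))
      · intro q hq
        rcases foldB_new_mem_stack world n _ _ q hq with hq1 | hq2
        · rcases hinv q hq1 with hst | hsat
          · rcases List.mem_append.mp hst with h' | h'
            · exact Or.inl (foldB_stack_mono world n _ _ q h')
            · have hqp : q = p := List.mem_singleton.mp h'
              subst hqp
              refine Or.inr ?_
              intro nb hnb hc
              obtain ⟨hd, hgnb⟩ := mem_get_neighbours.mp hnb
              refine foldB_cover world n _ _ nb ?_ hgnb hc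
              simpa using hd
          · exact Or.inr (fun nb hnb hc =>
              foldB_keep_mono world n _ _ nb (hsat nb hnb hc))
        · exact Or.inl hq2

-- ========== seed ==========

def stepS (world : List (List Int)) (n : Int) (i : Int) :
    PySem.Set (Int × Int) × List (Int × Int) → Int →
      PySem.Set (Int × Int) × List (Int × Int) :=
  fun st j =>
    if (i = 0 ∨ i = n - 1 ∨ j = 0 ∨ j = n - 1) ∧ cellB world i j = 1 then
      if PySem.Set.contains st.1 (i, j) = false then
        (PySem.Set.add st.1 (i, j), st.2 ++ [(i, j)])
      else st
    else st

def rowS (world : List (List Int)) (n : Int) :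
    PySem.Set (Int × Int) × List (Int × Int) → Int →
      PySem.Set (Int × Int) × List (Int × Int) :=
  fun st i => (PySem.List.pyRange 0 n 1).foldl (stepS world n i) st

theorem seedB_eq (world : List (List Int)) (n : Int) :
    seedB world n = (PySem.List.pyRange 0 n 1).foldl (rowS world n) (PySem.Set.empty, []) := rfl

-- the combined seed invariant: keep and stack have the same members, every member is an
-- in-range boundary 1-cell, and stack length + free cells ≤ n²
def SeedInv (world : List (List Int)) (n : Int)
    (st : PySem.Set (Int × Int) × List (Int × Int)) : Prop :=
  (∀ x, x ∈ st.1 ↔ x ∈ st.2) ∧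
  (∀ x ∈ st.1, (0 ≤ x.1 ∧ x.1 < n ∧ 0 ≤ x.2 ∧ x.2 < n) ∧
    (x.1 = 0 ∨ x.1 = n - 1 ∨ x.2 = 0 ∨ x.2 = n - 1) ∧ cellA world x = 1) ∧
  (st.2.length + freeS n st.1 ≤ n.toNat * n.toNat)

theorem stepS_inv (world : List (List Int)) (n i j : Int) (hi : 0 ≤ i ∧ i < n)
    (hj : 0 ≤ j ∧ j < n) (st : PySem.Set (Int × Int) × List (Int × Int))
    (h : SeedInv world n st) : SeedInv world n (stepS world n i st j) := by
  obtain ⟨hiff, hprop, hmea⟩ := h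
  unfold stepS
  by_cases h1 : (i = 0 ∨ i = n - 1 ∨ j = 0 ∨ j = n - 1) ∧ cellB world i j = 1
  · rw [if_pos h1]
    by_cases h2 : PySem.Set.contains st.1 (i, j) = false
    · rw [if_pos h2]
      have hnot : (i, j) ∉ st.1 := by
        intro h
        have := (PySem.Set.contains_iff st.1 (i, j)).mpr h
        rw [h2] at this
        exact Bool.false_ne_true this
      have hg : (0 : Int) ≤ (i, j).1 ∧ (i, j).1 < n ∧ (0 : Int) ≤ (i, j).2 ∧ (i, j).2 < n := by
        exact ⟨hi.1, hi.2, hj.1, hj.2⟩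
      refine ⟨?_, ?_, ?_⟩
      · intro x
        rw [PySem.Set.mem_add, List.mem_append, List.mem_singleton, hiff x]
      · intro x hx
        rcases (PySem.Set.mem_add st.1 (i, j) x).mp hx with h' | h'
        · exact hprop x h'
        · subst h'
          exact ⟨hg, h1.1, by rw [← cellBA]; exact h1.2⟩
      · have := freeS_add_lt (n := n) hg hnot
        simp only [List.length_append, List.length_singleton]
        omega
    · rw [if_neg h2]; exact ⟨hiff, hprop, hmea⟩
  · rw [if_neg h1]; exact ⟨hiff, hprop, hmea⟩

theorem seed_inv (world : List (List Int)) (n : Int) : SeedInv world n (seedB world n) := by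
  rw [seedB_eq]
  refine List.foldlRecOn (motive := SeedInv world n) _ _ ?_ (fun b hb i hi => ?_)
  · refine ⟨fun x => by simp [PySem.Set.empty], fun x hx => absurd hx (List.not_mem_nil), ?_⟩
    simpa using freeS_le n PySem.Set.empty
  · have hi' := (PySem.List.mem_pyRange_one).mp hi
    refine List.foldlRecOn (motive := SeedInv world n) _ _ hb (fun b' hb' j hj => ?_)
    have hj' := (PySem.List.mem_pyRange_one).mp hj
    exact stepS_inv world n i j hi' hj' b' hb'

theorem stepS_keep_mono (world : List (List Int)) (n i : Int)
    (st : PySem.Set (Int × Int) × List (Int × Int)) (j : Int) :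
    ∀ x ∈ st.1, x ∈ (stepS world n i st j).1 := by
  intro x hx
  unfold stepS
  split
  · split
    · exact (PySem.Set.mem_add st.1 (i, j) x).mpr (Or.inl hx)
    · exact hx
  · exact hx

theorem seed_point_row (world : List (List Int)) (n i j : Int)
    (hb : (i = 0 ∨ i = n - 1 ∨ j = 0 ∨ j = n - 1)) (hc : cellA world (i, j) = 1) :
    ∀ (l : List Int) (st : PySem.Set (Int × Int) × List (Int × Int)),
      j ∈ l → (i, j) ∈ (l.foldl (stepS world n i) st).1 := by
  intro l
  induction l with
  | nil => intro st h; exact absurd h (List.not_mem_nil)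
  | cons a l ih =>
    intro st hm
    simp only [List.foldl_cons]
    rcases List.mem_cons.mp hm with rfl | hm'
    · have hpt : (i, j) ∈ (stepS world n i st j).1 := by
        unfold stepS
        rw [if_pos ⟨hb, by rw [cellBA]; exact hc⟩]
        split
        · exact (PySem.Set.mem_add st.1 (i, j) (i, j)).mpr (Or.inr rfl)
        · rename_i h
          rcases h' : PySem.Set.contains st.1 (i, j) with _ | _
          · exact absurd h' h
          · exact (PySem.Set.contains_iff st.1 (i, j)).mp h'
      exact List.foldlRecOn (motive := fun (s : PySem.Set (Int × Int) × List (Int × Int)) => (i, j) ∈ s.1) l _ hpt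
        (fun b hb' a' _ => stepS_keep_mono world n i b a' _ hb')
    · exact ih _ hm'

theorem rowS_keep_mono (world : List (List Int)) (n : Int)
    (st : PySem.Set (Int × Int) × List (Int × Int)) (i : Int) :
    ∀ x ∈ st.1, x ∈ (rowS world n st i).1 := by
  intro x hx
  unfold rowS
  exact List.foldlRecOn (motive := fun (s : PySem.Set (Int × Int) × List (Int × Int)) => x ∈ s.1) _ _ hx
    (fun b hb j _ => stepS_keep_mono world n i b j x hb)

theorem seed_complete (world : List (List Int)) (n : Int) (i j : Int)
    (hi : 0 ≤ i ∧ i < n) (hj : 0 ≤ j ∧ j < n)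
    (hb : (i = 0 ∨ i = n - 1 ∨ j = 0 ∨ j = n - 1)) (hc : cellA world (i, j) = 1) :
    (i, j) ∈ (seedB world n).1 := by
  rw [seedB_eq]
  have hil : i ∈ PySem.List.pyRange 0 n 1 := (PySem.List.mem_pyRange_one).mpr ⟨hi.1, hi.2⟩
  have hjl : j ∈ PySem.List.pyRange 0 n 1 := (PySem.List.mem_pyRange_one).mpr ⟨hj.1, hj.2⟩
  clear hil
  -- walk down the outer list to row i, then use seed_point_row and monotonicity
  have main : ∀ (l : List Int) (st : PySem.Set (Int × Int) × List (Int × Int)),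
      i ∈ l → (i, j) ∈ (l.foldl (rowS world n) st).1 := by
    intro l
    induction l with
    | nil => intro st h; exact absurd h (List.not_mem_nil)
    | cons a l ih =>
      intro st hm
      simp only [List.foldl_cons]
      rcases List.mem_cons.mp hm with rfl | hm'
      · have hpt : (i, j) ∈ (rowS world n st i).1 :=
          seed_point_row world n i j hb hc _ st hjl
        exact List.foldlRecOn (motive := fun (s : PySem.Set (Int × Int) × List (Int × Int)) => (i, j) ∈ s.1) l _ hpt
          (fun b hb' a' _ => rowS_keep_mono world n b a' _ hb')
      · exact ih _ hm'
  exact main _ _ ((PySem.List.mem_pyRange_one).mpr ⟨hi.1, hi.2⟩)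

-- ========== assembly ==========

theorem keep_final_iff (world : List (List Int)) (x : Int × Int) :
    x ∈ loopB world (world.length : Int) (6 * (world.length * world.length) + 1)
        (seedB world (world.length : Int)).2 (seedB world (world.length : Int)).1 ↔
      ReachA world x := by
  obtain ⟨hiff, hprop, hmea⟩ := seed_inv world (world.length : Int)
  have hL : ((world.length : Int)).toNat = world.length := Int.toNat_natCast _
  constructor
  · refine loopB_sound world _ _ _ (fun y hy => (hiff y).mpr hy) ?_ x
    intro y hy
    obtain ⟨hg, hb, hc⟩ := hprop y hy
    exact ReachA.base y (mem_edgesA.mpr ⟨hg, hb⟩) hc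
  · intro hx
    induction hx with
    | base p hpe hpc =>
      obtain ⟨hg, hb⟩ := mem_edgesA.mp hpe
      have : p ∈ (seedB world (world.length : Int)).1 := by
        obtain ⟨pi, pj⟩ := p
        exact seed_complete world _ pi pj ⟨hg.1, hg.2.1⟩ ⟨hg.2.2.1, hg.2.2.2⟩ hb hpc
      exact loopB_mono world _ _ _ _ p this
    | step p q _ hq hc ih =>
      have hsat := loopB_sat world (world.length : Int)
        (6 * (world.length * world.length) + 1)
        (seedB world (world.length : Int)).2 (seedB world (world.length : Int)).1
        (by
          have h1 := freeS_le (world.length : Int) (seedB world (world.length : Int)).1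
          rw [hL] at h1
          rw [hL] at hmea
          omega)
        (fun y hy => (hiff y).mpr hy)
        (fun y hy => Or.inl ((hiff y).mp hy))
      exact hsat p ih q hq hc

theorem ports_eq (world : List (List Int)) :
    isolate_islands world = isolate_islands_alt world := by
  have hiff : ∀ x, x ∈ continentA world ↔
      x ∈ loopB world (world.length : Int) (6 * (world.length * world.length) + 1)
        (seedB world (world.length : Int)).2 (seedB world (world.length : Int)).1 := by
    intro x
    rw [keep_final_iff world x]
    exact ⟨SA_sound world x, SA_complete world x⟩
  simp only [isolate_islands, isolate_islands_alt]
  apply List.map_congr_left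
  intro ir _
  apply List.map_congr_left
  intro jc _
  apply if_congr _ rfl rfl
  apply and_congr_right
  intro _
  rw [← Bool.not_eq_true]
  exact not_congr ((hiff _).trans (PySem.Set.contains_iff _ _).symm)

-- ===== VERDICT (by name: the statement is the Claim_ definition above) =====
theorem isolate_islands_spec : Claim_equal_isolate_islands := by
  intro world _ _
  unfold Spec_isolate_islands
  exact ports_eq world
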